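-- pv_equiv track=rewrite | github.com/ethereal-keys/NLP-Project | Agentic Fine tuning/validate-jsonl.py | summarize_role_key_sequence
-- ===== SOURCE A (Python) =====
-- from itertools import groupby
--
-- def summarize_role_key_sequence(messages):
--     """
--     Summarize a list of messages into consecutive role-key set counts.
--     E.g., [{'role': 'assistant', keys: ['role', 'content']}, {'role': 'tool', keys: ['role', 'name']}]
--     -> [(['assistant', ['role', 'content']], 1), (['tool', ['role', 'name']], 1)]
--     """
--     role_key_pairs = []
--     for msg in messages:
--         if isinstance(msg, dict):
--             role = msg.get("role", "missing")
--             keys = sorted(msg.keys())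
--             role_key_pairs.append((role, keys))
--         else:
--             role_key_pairs.append(("invalid", ["invalid"]))
--     return [((role, keys), len(list(group))) for (role, keys), group in groupby(role_key_pairs)]
-- ===== SOURCE B (Python) =====
-- def summarize_role_key_sequence(messages):
--     """Boundary-index method: find positions where the (role, sorted-keys)
--     signature changes, then read each run's count off as the difference of
--     consecutive boundary positions (no run counter is ever incremented)."""
--     def mkey(msg):
--         if isinstance(msg, dict):
--             return (msg.get("role", "missing"), sorted(msg.keys()))
--         return ("invalid", ["invalid"])
--     ks = [mkey(m) for m in messages]
--     # predecessors, wrapped in 1-tuples so the leading None can't equal a key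
--     prevs = [None] + [(k,) for k in ks]
--     starts = [(i, k) for i, (k, p) in enumerate(zip(ks, prevs)) if (k,) != p]
--     bounds = [i for i, _ in starts[1:]] + [len(ks)]
--     return [(k, e - s) for (s, k), e in zip(starts, bounds)]
-- ===== Notes on version B (the rewrite author's own statement) =====
-- stated objective: alternative
-- what changed: Instead of streaming runs with a counter (itertools.groupby), B first marks the positions where the (role, sorted-keys) signature changes by zipping the key list with its shifted self, then reads each run length off as the difference of consecutive boundary positions; no run counter is ever incremented.
import Mathlib
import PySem

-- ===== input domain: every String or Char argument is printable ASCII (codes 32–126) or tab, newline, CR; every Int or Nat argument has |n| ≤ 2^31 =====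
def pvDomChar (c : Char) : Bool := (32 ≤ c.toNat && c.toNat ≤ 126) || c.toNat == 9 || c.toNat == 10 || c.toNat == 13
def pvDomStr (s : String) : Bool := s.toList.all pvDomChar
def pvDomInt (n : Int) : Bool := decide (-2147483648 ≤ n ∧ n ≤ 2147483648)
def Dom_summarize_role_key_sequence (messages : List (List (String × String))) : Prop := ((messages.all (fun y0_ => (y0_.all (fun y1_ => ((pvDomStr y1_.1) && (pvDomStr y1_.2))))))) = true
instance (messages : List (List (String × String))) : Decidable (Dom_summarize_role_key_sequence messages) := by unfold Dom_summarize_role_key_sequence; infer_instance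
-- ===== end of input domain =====

-- B replaces A's groupby run counting by a boundary-position method: mark where the
-- key changes, then read run lengths off as differences of consecutive boundary
-- positions (objective: alternative decomposition, same cost).

-- ===== PORT A =====
-- msg is typed as a dict here, so A's isinstance branch is always taken:
-- role = msg.get("role", "missing"); keys = sorted(msg.keys())
def pvKeyA (msg : List (String × String)) : String × List String :=
  let d := PySem.Dict.ofList msg
  (d.getD "role" "missing", PySem.List.sorted d.keys (fun s => s) false)

-- hand port of itertools.groupby + len(list(group)): one (key, run length) pair per
-- maximal run of ==-equal consecutive elements, exact on any list
def pvGroupby (k : String × List String) (n : Int) :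
    List (String × List String) → List ((String × List String) × Int)
  | [] => [(k, n)]
  | x :: xs => if x = k then pvGroupby k (n + 1) xs else (k, n) :: pvGroupby x 1 xs

def summarize_role_key_sequence (messages : List (List (String × String))) :
    List ((String × List String) × Int) :=
  let role_key_pairs := messages.map pvKeyA
  match role_key_pairs with
  | [] => []
  | x :: xs => pvGroupby x 1 xs

-- ===== PORT B =====
def pvKeyB (msg : List (String × String)) : String × List String :=
  let d := PySem.Dict.ofList msg
  (d.getD "role" "missing", PySem.List.sorted d.keys (fun s => s) false)

-- Python wraps predecessors in 1-tuples with a leading None; Option models that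
-- exactly: none = the leading None, some k = the wrapped key (k,).
def summarize_role_key_sequence_alt (messages : List (List (String × String))) :
    List ((String × List String) × Int) :=
  let ks := messages.map pvKeyB
  let prevs : List (Option (String × List String)) := none :: ks.map some
  let starts :=
    ((PySem.List.enumerate (ks.zip prevs) 0).filter
        (fun ip => decide (some ip.2.1 ≠ ip.2.2))).map (fun ip => (ip.1, ip.2.1))
  let bounds := (PySem.List.slice starts (some 1) none).map (fun p => p.1) ++ [(ks.length : Int)]
  (starts.zip bounds).map (fun se => (se.1.2, se.2 - se.1.1))

-- ===== PRECONDITION & SPEC =====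
def Spec_summarize_role_key_sequence (messages : List (List (String × String))) (out : List ((String × List String) × Int)) : Prop := out = summarize_role_key_sequence_alt messages
instance (messages : List (List (String × String))) (out : List ((String × List String) × Int)) : Decidable (Spec_summarize_role_key_sequence messages out) := by unfold Spec_summarize_role_key_sequence; infer_instance

-- ===== CLAIM (what is proved, stated in full; the proofs are below) =====
def Claim_equal_summarize_role_key_sequence : Prop := ∀ (messages : List (List (String × String))), Dom_summarize_role_key_sequence messages → Spec_summarize_role_key_sequence messages (summarize_role_key_sequence messages)

-- ===== LEMMAS AND PROOFS =====

theorem pvKeyB_eq_pvKeyA : pvKeyB = pvKeyA := rfl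

-- positions (from offset i) where the key differs from its predecessor (prev = p)
def pvChanges (i : Int) (p : String × List String) :
    List (String × List String) → List (Int × (String × List String))
  | [] => []
  | x :: l => if x = p then pvChanges (i + 1) x l else (i, x) :: pvChanges (i + 1) x l

-- read the run lengths off a boundary list: each count is the next boundary minus this one
def pvAssemble (n : Int) :
    List (Int × (String × List String)) → List ((String × List String) × Int)
  | [] => []
  | (s, k) :: rest =>
      (k, (match rest with | (s', _) :: _ => s' | [] => n) - s) :: pvAssemble n rest

-- the filtered enumerate over (key, predecessor) pairs is pvChanges
theorem pvStarts_eq (xs : List (String × List String)) (p : String × List String)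
    (i : Int) :
    ((PySem.List.enumerate (xs.zip ((p :: xs).map some)) i).filter
        (fun ip => decide (some ip.2.1 ≠ ip.2.2))).map (fun ip => (ip.1, ip.2.1))
      = pvChanges i p xs := by
  induction xs generalizing p i with
  | nil => rfl
  | cons x l ih =>
      simp only [List.map_cons, List.zip_cons_cons, PySem.List.enumerate_cons,
        List.filter_cons, pvChanges]
      by_cases hx : x = p
      · rw [if_neg (by simp [hx]), if_pos hx, ← ih x (i + 1)]
        simp
      · rw [if_pos (by simp [hx]), if_neg hx, List.map_cons, ← ih x (i + 1)]
        simp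

theorem pvAssemble_eq (sts : List (Int × (String × List String))) (n : Int) :
    (sts.zip ((sts.tail.map Prod.fst) ++ [n])).map (fun se => (se.1.2, se.2 - se.1.1))
      = pvAssemble n sts := by
  induction sts with
  | nil => rfl
  | cons hd rest ih =>
      obtain ⟨s, k⟩ := hd
      cases rest with
      | nil => rfl
      | cons hd2 r2 =>
          obtain ⟨s2, k2⟩ := hd2
          simp only [List.tail_cons, List.map_cons, List.cons_append,
            List.zip_cons_cons, pvAssemble] at ih ⊢
          rw [← ih]

theorem pvMain (xs : List (String × List String)) (k : String × List String)
    (a c : Int) :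
    pvAssemble (a + c + xs.length) ((a, k) :: pvChanges (a + c) k xs)
      = pvGroupby k c xs := by
  induction xs generalizing k a c with
  | nil =>
      simp [pvChanges, pvAssemble, pvGroupby]
  | cons x l ih =>
      simp only [pvChanges, pvGroupby, List.length_cons]
      by_cases hx : x = k
      · rw [if_pos hx, if_pos hx, hx]
        have h1 : a + c + ((l.length : Int) + 1) = a + (c + 1) + l.length := by ring
        have h2 : a + c + 1 = a + (c + 1) := by ring
        rw [show ((l.length + 1 : Nat) : Int) = (l.length : Int) + 1 by push_cast; ring,
          h1, h2]
        exact ih k a (c + 1)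
      · rw [if_neg hx, if_neg hx]
        have h1 : a + c + ((l.length + 1 : Nat) : Int) = a + c + 1 + l.length := by
          push_cast; ring
        rw [h1]
        have hih := ih x (a + c) 1
        simp only [pvAssemble] at hih ⊢
        rw [hih, show a + c - a = c by ring]

-- ===== VERDICT (by name: the statement is the Claim_ definition above) =====
theorem summarize_role_key_sequence_spec : Claim_equal_summarize_role_key_sequence := by
  intro messages _
  unfold Spec_summarize_role_key_sequence summarize_role_key_sequence summarize_role_key_sequence_alt
  cases messages with
  | nil => rfl
  | cons m ms =>
      simp only [pvKeyB_eq_pvKeyA, List.map_cons, List.zip_cons_cons,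
        PySem.List.slice_from_one, PySem.List.enumerate_cons, List.filter_cons]
      rw [if_pos (by simp)]
      have hs := pvStarts_eq (ms.map pvKeyA) (pvKeyA m) 1
      simp only [List.map_cons] at hs
      have h01 : (0 : Int) + 1 = 1 := by norm_num
      rw [h01, List.map_cons, hs, pvAssemble_eq]
      have hm := pvMain (ms.map pvKeyA) (pvKeyA m) 0 1
      norm_num at hm
      convert hm.symm using 2
      simp only [List.length_cons, List.length_map]
      push_cast
      ring
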